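-- pv_equiv track=rewrite | github.com/pervanne69/leetcode_practice | nums and queries.py | nums_and_queries
-- ===== SOURCE A (Python) =====
-- from collections import Counter
--
-- def nums_and_queries(nums, queries):
--     if not queries:
--         return []
--     if not nums and queries:
--         return [0 for _ in range(len(queries))]
--     n = len(nums)
--     m = len(queries)
--     counts = dict()
--     for i in range(n):
--         counts[nums[i]] = counts.get(nums[i], 0) + 1
--     freq_count = Counter(counts.values())
--     answer = [freq_count[q] if q in freq_count else 0 for q in queries]
--     return answer
-- ===== SOURCE B (Python) =====
-- from collections import Counter
--
-- def nums_and_queries(nums, queries):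
--     counts = Counter(nums)
--     return [sum(1 for c in counts.values() if c == q) for q in queries]
-- ===== Notes on version B (the rewrite author's own statement) =====
-- stated objective: simpler
-- what changed: B drops the two special-case guards and the precomputed frequency-of-frequencies table: it builds one Counter(nums) and answers each query by a direct scan over the counts, instead of indexing a second Counter built over the first.
import Mathlib
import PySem

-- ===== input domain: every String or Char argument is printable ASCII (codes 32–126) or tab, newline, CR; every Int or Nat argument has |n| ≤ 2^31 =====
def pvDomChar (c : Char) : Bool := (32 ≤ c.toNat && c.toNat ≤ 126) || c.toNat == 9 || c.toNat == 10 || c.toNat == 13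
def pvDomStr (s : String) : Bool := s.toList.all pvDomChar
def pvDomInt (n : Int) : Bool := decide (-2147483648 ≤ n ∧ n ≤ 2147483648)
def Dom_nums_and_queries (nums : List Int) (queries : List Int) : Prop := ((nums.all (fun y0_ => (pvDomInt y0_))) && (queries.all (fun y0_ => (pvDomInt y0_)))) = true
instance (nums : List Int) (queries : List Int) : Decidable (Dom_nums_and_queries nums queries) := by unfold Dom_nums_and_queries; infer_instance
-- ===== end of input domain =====

-- B: same answers, but without the special-case guards and without the second
-- frequency-of-frequencies Counter — one Counter(nums), then a scan of its values per query.

-- ===== PORT A =====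
def nums_and_queries (nums : List Int) (queries : List Int) : List Int :=
  if queries = [] then []
  else if nums = [] then (PySem.List.pyRange 0 (queries.length : Int) 1).map (fun _ => (0 : Int))
  else
    let n : Int := (nums.length : Int)
    let _m : Int := (queries.length : Int)
    let counts : PySem.Dict Int Int :=
      (PySem.List.pyRange 0 n 1).foldl
        (fun d i => d.insert (PySem.List.pyGetD nums i 0) (d.getD (PySem.List.pyGetD nums i 0) 0 + 1))
        PySem.Dict.empty
    let freq_count : PySem.Dict Int Int := PySem.Dict.counter counts.values
    queries.map (fun q => if freq_count.contains q then freq_count.getD q 0 else 0)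

-- ===== PORT B =====
def nums_and_queries_alt (nums : List Int) (queries : List Int) : List Int :=
  let counts : PySem.Dict Int Int := PySem.Dict.counter nums
  queries.map (fun q => counts.values.foldl (fun acc c => if c == q then acc + 1 else acc) 0)

-- ===== PRECONDITION & SPEC =====
def Spec_nums_and_queries (nums : List Int) (queries : List Int) (out : List Int) : Prop := out = nums_and_queries_alt nums queries
instance (nums : List Int) (queries : List Int) (out : List Int) : Decidable (Spec_nums_and_queries nums queries out) := by unfold Spec_nums_and_queries; infer_instance

-- ===== CLAIM (what is proved, stated in full; the proofs are below) =====
def Claim_equal_nums_and_queries : Prop := ∀ (nums : List Int) (queries : List Int), Dom_nums_and_queries nums queries → Spec_nums_and_queries nums queries (nums_and_queries nums queries)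

-- ===== LEMMAS AND PROOFS =====

-- each B-entry is the count of q among the distinct-value multiplicities
theorem alt_entry (nums : List Int) (q : Int) :
    (PySem.Dict.counter nums).values.foldl (fun acc c => if c == q then acc + 1 else acc) 0
      = ((PySem.Dict.counter nums).values.count q : Int) := by
  simpa using PySem.List.foldl_beq_add_one (l := (PySem.Dict.counter nums).values) (v := q) (a := 0)

-- A's counts loop is Counter(nums)
theorem counts_eq (nums : List Int) :
    (PySem.List.pyRange 0 (nums.length : Int) 1).foldl
        (fun d i => d.insert (PySem.List.pyGetD nums i 0) (d.getD (PySem.List.pyGetD nums i 0) 0 + 1))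
        PySem.Dict.empty = PySem.Dict.counter nums := by
  rw [PySem.List.foldl_pyRange_pyGetD' (f := fun d x => PySem.Dict.insert d x (d.getD x 0 + 1))
        (xs := nums) (d := 0) (init := PySem.Dict.empty) (a := 0) (by norm_num)]
  simpa using PySem.Dict.foldl_insert_getD_add_one_eq_counter (xs := nums)

-- ===== VERDICT (by name: the statement is the Claim_ definition above) =====
theorem nums_and_queries_spec : Claim_equal_nums_and_queries := by
  intro nums queries _
  unfold Spec_nums_and_queries nums_and_queries nums_and_queries_alt
  by_cases hq : queries = []
  · simp [hq]
  · by_cases hn : nums = []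
    · simp [hq, hn, PySem.Dict.counter, PySem.Dict.values, PySem.Dict.empty, List.map_const',
            PySem.List.length_pyRange_one]
    · simp only [hq, hn, if_false]
      rw [counts_eq]
      apply List.map_congr_left
      intro q _
      rw [alt_entry]
      by_cases hc : (PySem.Dict.counter (PySem.Dict.counter nums).values).contains q
      · simp [hc, PySem.Dict.getD_counter]
      · simp only [hc]
        have : q ∉ (PySem.Dict.counter nums).values := by
          intro hmem
          exact hc (by simpa [PySem.Dict.contains_counter] using List.elem_eq_true_of_mem hmem)
        simp [List.count_eq_zero.mpr this]
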